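-- pv_equiv track=rewrite | github.com/alexandrepoirier/XB1_SYNTH | utils/MidiInfo.py | getOctavesInRange
-- ===== SOURCE A (Python) =====
-- def getOctavesInRange(note, start, stop):
--     if note < start or note > stop:
--         raise ValueError("'note' must be within specified range")
--
--     res = [note]
--     i = 1
--     while True:
--         oct_up = note + (12 * i)
--         if oct_up < stop:
--             res.append(oct_up)
--
--         oct_down = note - (12 * i)
--         if oct_down > start:
--             res.append(oct_down)
--
--         if oct_up > stop and oct_down < start:
--             break
--         i += 1
--     res.sort()
--     return res
-- ===== SOURCE B (Python) =====
-- def getOctavesInRange(note, start, stop):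
--     if note < start or note > stop:
--         raise ValueError("'note' must be within specified range")
--
--     lowest = note
--     while lowest - 12 > start:
--         lowest -= 12
--     highest = note
--     while highest + 12 < stop:
--         highest += 12
--     return list(range(lowest, highest + 1, 12))
-- ===== Notes on version B (the rewrite author's own statement) =====
-- stated objective: simpler
-- what changed: B computes the lowest and highest in-range octave notes with two monotone while-sweeps and returns list(range(lowest, highest+1, 12)), replacing A's while-True loop that appends octave notes on both sides interleaved and then sorts the result.
import Mathlib
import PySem

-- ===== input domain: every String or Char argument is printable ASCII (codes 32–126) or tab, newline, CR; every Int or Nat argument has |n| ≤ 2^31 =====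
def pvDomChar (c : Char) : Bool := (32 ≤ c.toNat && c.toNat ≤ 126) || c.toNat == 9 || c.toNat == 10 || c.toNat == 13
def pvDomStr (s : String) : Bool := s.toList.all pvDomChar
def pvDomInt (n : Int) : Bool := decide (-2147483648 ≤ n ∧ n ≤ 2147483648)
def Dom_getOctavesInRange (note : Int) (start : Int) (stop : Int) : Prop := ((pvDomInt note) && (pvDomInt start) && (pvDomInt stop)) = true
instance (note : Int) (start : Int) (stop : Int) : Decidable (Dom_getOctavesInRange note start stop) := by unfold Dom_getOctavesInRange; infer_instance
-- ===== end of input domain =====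

-- B computes the lowest and highest in-range octave notes by two monotone sweeps and
-- returns range(lowest, highest+1, 12), replacing A's interleaved two-sided appends
-- inside a while-True loop followed by a sort (objective: simpler).

-- ===== PORT A =====
-- termination measures for the ports, named (with small proof terms) so the definitions stay small
theorem pvSum_dec (a b : Int) (h : 0 ≤ a ∨ 0 ≤ b) :
    a.toNat + b.toNat < (a + 12).toNat + (b + 12).toNat := by
  rcases h with ha | hb
  · exact Nat.add_lt_add_of_lt_of_le
      ((Int.toNat_lt_toNat (lt_of_le_of_lt ha (lt_add_of_pos_right a (by decide)))).mpr
        (lt_add_of_pos_right a (by decide)))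
      (Int.toNat_le_toNat (le_add_of_nonneg_right (by decide)))
  · exact Nat.add_lt_add_of_le_of_lt
      (Int.toNat_le_toNat (le_add_of_nonneg_right (by decide)))
      ((Int.toNat_lt_toNat (lt_of_le_of_lt hb (lt_add_of_pos_right b (by decide)))).mpr
        (lt_add_of_pos_right b (by decide)))

theorem pvAloop_dec {note start stop i : Int}
    (h : ¬(note + 12 * i > stop ∧ note - 12 * i < start)) :
    (stop - (note + 12 * (i + 1)) + 12).toNat + ((note - 12 * (i + 1)) - start + 12).toNat
      < (stop - (note + 12 * i) + 12).toNat + ((note - 12 * i) - start + 12).toNat := by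
  have e1 : stop - (note + 12 * (i + 1)) + 12 = stop - (note + 12 * i) := by
    rw [mul_add, mul_one]; abel
  have e2 : (note - 12 * (i + 1)) - start + 12 = (note - 12 * i) - start := by
    rw [mul_add, mul_one]; abel
  rw [e1, e2]
  refine pvSum_dec _ _ ?_
  rcases not_and_or.mp h with h1 | h1
  · exact Or.inl (Int.sub_nonneg.mpr (not_lt.mp h1))
  · exact Or.inr (Int.sub_nonneg.mpr (not_lt.mp h1))

theorem pvDown_dec {x start : Int} (h : x - 12 > start) :
    (x - 12 - start).toNat < (x - start).toNat :=
  (Int.toNat_lt_toNat (Int.sub_pos.mpr (h.trans (sub_lt_self x (by decide))))).mpr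
    (sub_lt_sub_right (sub_lt_self x (by decide)) start)

theorem pvUp_dec {x stop : Int} (h : x + 12 < stop) :
    (stop - (x + 12)).toNat < (stop - x).toNat :=
  (Int.toNat_lt_toNat (Int.sub_pos.mpr ((lt_add_of_pos_right x (by decide)).trans h))).mpr
    (sub_lt_sub_left (lt_add_of_pos_right x (by decide)) stop)

-- the 'while True' loop of A: res and i are the loop state; the break condition ends the recursion
def pvAloop (note start stop : Int) (res : List Int) (i : Int) : List Int :=
  let oct_up := note + 12 * i
  let res1 := if oct_up < stop then res ++ [oct_up] else res
  let oct_down := note - 12 * i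
  let res2 := if oct_down > start then res1 ++ [oct_down] else res1
  if oct_up > stop ∧ oct_down < start then res2
  else pvAloop note start stop res2 (i + 1)
termination_by ((stop - (note + 12 * i) + 12).toNat + ((note - 12 * i) - start + 12).toNat)
decreasing_by exact pvAloop_dec (by assumption)

-- A raises ValueError when note < start or note > stop (excluded by Pre_); [] is a placeholder there
def getOctavesInRange (note : Int) (start : Int) (stop : Int) : List Int :=
  if note < start ∨ note > stop then []
  else PySem.List.sorted (pvAloop note start stop [note] 1) (fun x => x)

-- ===== PORT B =====
-- 'while lowest - 12 > start: lowest -= 12'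
def pvLowest (lowest start : Int) : Int :=
  if lowest - 12 > start then pvLowest (lowest - 12) start else lowest
termination_by (lowest - start).toNat
decreasing_by exact pvDown_dec (by assumption)

-- 'while highest + 12 < stop: highest += 12'
def pvHighest (highest stop : Int) : Int :=
  if highest + 12 < stop then pvHighest (highest + 12) stop else highest
termination_by (stop - highest).toNat
decreasing_by exact pvUp_dec (by assumption)

def getOctavesInRange_alt (note : Int) (start : Int) (stop : Int) : List Int :=
  if note < start ∨ note > stop then []
  else PySem.List.pyRange (pvLowest note start) (pvHighest note stop + 1) 12

-- ===== PRECONDITION & SPEC =====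
-- Pre_ excludes exactly the inputs on which A raises ValueError ('note' outside [start, stop])
def Pre_getOctavesInRange (note : Int) (start : Int) (stop : Int) : Prop :=
  start ≤ note ∧ note ≤ stop
instance (note : Int) (start : Int) (stop : Int) : Decidable (Pre_getOctavesInRange note start stop) := by unfold Pre_getOctavesInRange; infer_instance

def pvWitness_getOctavesInRange : Int × Int × Int := (60, 0, 127)

def Spec_getOctavesInRange (note : Int) (start : Int) (stop : Int) (out : List Int) : Prop := out = getOctavesInRange_alt note start stop
instance (note : Int) (start : Int) (stop : Int) (out : List Int) : Decidable (Spec_getOctavesInRange note start stop out) := by unfold Spec_getOctavesInRange; infer_instance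

-- ===== CLAIM (what is proved, stated in full; the proofs are below) =====
def Claim_equal_getOctavesInRange : Prop := ∀ (note : Int) (start : Int) (stop : Int), Dom_getOctavesInRange note start stop → Pre_getOctavesInRange note start stop → Spec_getOctavesInRange note start stop (getOctavesInRange note start stop)

-- ===== LEMMAS AND PROOFS =====

-- the octave notes strictly above x and strictly below stop, ascending
def pvUps (stop x : Int) : List Int :=
  if x + 12 < stop then (x + 12) :: pvUps stop (x + 12) else []
termination_by (stop - x).toNat
decreasing_by exact pvUp_dec (by assumption)

-- the octave notes strictly below x and strictly above start, descending
def pvDowns (start x : Int) : List Int :=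
  if x - 12 > start then (x - 12) :: pvDowns start (x - 12) else []
termination_by (x - start).toNat
decreasing_by exact pvDown_dec (by assumption)

lemma pvUps_step (stop x : Int) :
    pvUps stop x = (if x + 12 < stop then [x + 12] else []) ++ pvUps stop (x + 12) := by
  by_cases h : x + 12 < stop
  · rw [pvUps, if_pos h, if_pos h]; rfl
  · rw [pvUps, if_neg h, if_neg h, pvUps, if_neg (by omega)]
    rfl

lemma pvDowns_step (start x : Int) :
    pvDowns start x = (if x - 12 > start then [x - 12] else []) ++ pvDowns start (x - 12) := by
  by_cases h : x - 12 > start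
  · rw [pvDowns, if_pos h, if_pos h]; rfl
  · rw [pvDowns, if_neg h, if_neg h, pvDowns, if_neg (by omega)]
    rfl

-- A's loop appends exactly the notes of pvUps and pvDowns (in interleaved order)
lemma pvAloop_perm (note start stop : Int) (res : List Int) (i : Int) :
    (pvAloop note start stop res i).Perm
      (res ++ pvUps stop (note + 12 * (i - 1)) ++ pvDowns start (note - 12 * (i - 1))) := by
  fun_induction pvAloop note start stop res i with
  | case1 res i oct_up res1 oct_down res2 hbrk =>
      rw [pvUps, if_neg (by omega), pvDowns, if_neg (by omega)]
      simp only [res2, res1]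
      rw [dif_neg (by omega), dif_neg (by omega)]
      simp
  | case2 res i oct_up res1 oct_down res2 hbrk ih =>
      rw [pvUps_step stop (note + 12 * (i - 1)), pvDowns_step start (note - 12 * (i - 1))]
      have e1 : note + 12 * (i - 1) + 12 = note + 12 * i := by ring
      have e2 : note - 12 * (i - 1) - 12 = note - 12 * i := by ring
      rw [e1, e2]
      have e3 : note + 12 * (i + 1 - 1) = note + 12 * i := by ring
      have e4 : note - 12 * (i + 1 - 1) = note - 12 * i := by ring
      rw [e3, e4] at ih
      refine ih.trans ?_
      set u := (if note + 12 * i < stop then [note + 12 * i] else []) with hu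
      set d := (if note - 12 * i > start then [note - 12 * i] else []) with hd
      set U := pvUps stop (note + 12 * i)
      set D := pvDowns start (note - 12 * i)
      have hres2 : res2 = res ++ u ++ d := by
        simp only [res2, res1, hu, hd]
        split_ifs <;> simp [oct_up, oct_down]
      rw [hres2]
      simp only [List.append_assoc]
      exact (List.Perm.append_left res (List.Perm.append_left u
        (List.perm_append_comm_assoc d U D)))

lemma pyRange12_nil (a b : Int) (h : b ≤ a) : PySem.List.pyRange a b 12 = [] := by
  rw [PySem.List.pyRange_of_pos _ _ (by norm_num), if_neg (by omega)]
  simp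

lemma pyRange12_cons (a b : Int) (h : a < b) :
    PySem.List.pyRange a b 12 = a :: PySem.List.pyRange (a + 12) b 12 := by
  rw [PySem.List.pyRange_of_pos _ _ (by norm_num),
      PySem.List.pyRange_of_pos _ _ (by norm_num), if_pos h]
  have hn : ((b - a + 12 - 1) / 12).toNat =
      (if a + 12 < b then ((b - (a + 12) + 12 - 1) / 12).toNat else 0) + 1 := by
    split_ifs with h2 <;> omega
  rw [hn, List.range_succ_eq_map]
  simp only [List.map_cons, List.map_map]
  congr 1
  · omega
  · refine List.map_congr_left ?_
    intro k _
    simp [Function.comp]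
    ring

lemma pyRange12_pairwise (a b : Int) : (PySem.List.pyRange a b 12).Pairwise (· < ·) := by
  rw [PySem.List.pyRange_of_pos _ _ (by norm_num), List.pairwise_map]
  exact List.pairwise_lt_range.imp (by intro p q hpq; omega)

lemma pvHighest_ge (x stop : Int) : x ≤ pvHighest x stop := by
  fun_induction pvHighest x stop with
  | case1 x h ih => omega
  | case2 x h => omega

-- B's upward sweep yields exactly note followed by the upward octave notes
lemma hi_eq (x stop : Int) :
    x :: pvUps stop x = PySem.List.pyRange x (pvHighest x stop + 1) 12 := by
  fun_induction pvUps stop x with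
  | case1 x h ih =>
      rw [pvHighest, if_pos h, pyRange12_cons x _ (by have := pvHighest_ge (x + 12) stop; omega)]
      rw [← ih]
  | case2 x h =>
      rw [pvHighest, if_neg h, pyRange12_cons x _ (by omega), pyRange12_nil _ _ (by omega)]

-- B's downward sweep prepends exactly the reversed downward octave notes
lemma lo_eq (start E : Int) (x : Int) (hxE : x ≤ E) :
    (pvDowns start x).reverse ++ PySem.List.pyRange x E 12 =
      PySem.List.pyRange (pvLowest x start) E 12 := by
  fun_induction pvDowns start x with
  | case1 x h ih =>
      rw [pvLowest, if_pos h, ← ih (by omega)]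
      rw [pyRange12_cons (x - 12) E (by omega)]
      simp
  | case2 x h =>
      rw [pvLowest, if_neg h]
      simp

-- ===== VERDICT (by name: the statement is the Claim_ definition above) =====
theorem getOctavesInRange_spec : Claim_equal_getOctavesInRange := by
  intro note start stop hDom hPre
  obtain ⟨h1, h2⟩ := hPre
  unfold Spec_getOctavesInRange getOctavesInRange getOctavesInRange_alt
  rw [if_neg (by omega), if_neg (by omega)]
  have hT : PySem.List.pyRange (pvLowest note start) (pvHighest note stop + 1) 12
      = (pvDowns start note).reverse ++ (note :: pvUps stop note) := by
    rw [← lo_eq start _ note (by have := pvHighest_ge note stop; omega), hi_eq]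
  apply PySem.List.sorted_eq_of_perm_of_pairwise_lt
  · rw [hT]
    have hA := pvAloop_perm note start stop [note] 1
    have e1 : note + 12 * (1 - 1) = note := by ring
    have e2 : note - 12 * (1 - 1) = note := by ring
    rw [e1, e2] at hA
    refine List.Perm.trans ?_ hA.symm
    have hEq : (note :: pvUps stop note) ++ pvDowns start note
        = [note] ++ pvUps stop note ++ pvDowns start note := by simp
    refine List.perm_append_comm.trans ?_
    rw [← hEq]
    exact List.Perm.append_left _ (List.reverse_perm _)
  · rw [hT, ← hT]
    exact (pyRange12_pairwise _ _).imp (by intro a b h; exact h)
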